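-- pv_equiv track=rewrite | github.com/embydextrous/Interview | arrays/rotationsAndReversals/0-rev.py | maxHammingDistance
-- ===== SOURCE A (Python) =====
-- def maxHammingDistance(a):
--     n = len(a)
--     s = a + a
--     mhd = 0
--     mhdIndex = 0
--     for i in range(1, n-1):
--         chd = 0
--         for j in range(n):
--             if s[j] != s[i+j]:
--                 chd += 1
--         if chd > mhd:
--             mhd = chd
--             mhdIndex = i
--     return (mhd, s[mhdIndex:mhdIndex + n])
-- ===== SOURCE B (Python) =====
-- def maxHammingDistance(a):
--     n = len(a)
--     # group positions by value
--     pos = {}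
--     for j, v in enumerate(a):
--         pos[v] = pos.get(v, []) + [j]
--     # matches[i] = number of j with a[j] == a[(i+j) % n]
--     matches = [0] * n
--     for idxs in pos.values():
--         for p in idxs:
--             for q in idxs:
--                 matches[(q - p) % n] += 1
--     mhd = 0
--     mhdIndex = 0
--     for i in range(1, n - 1):
--         chd = n - matches[i]
--         if chd > mhd:
--             mhd = chd
--             mhdIndex = i
--     s = a + a
--     return (mhd, s[mhdIndex:mhdIndex + n])
-- ===== Notes on version B (the rewrite author's own statement) =====
-- stated objective: faster
-- what changed: B builds a value-to-positions index once and buckets every same-value position pair (p,q) into a per-shift match histogram at (q-p) % n, so the selection loop just reads chd = n - matches[i], replacing A's full rescan of the array for every shift.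
import Mathlib
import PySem

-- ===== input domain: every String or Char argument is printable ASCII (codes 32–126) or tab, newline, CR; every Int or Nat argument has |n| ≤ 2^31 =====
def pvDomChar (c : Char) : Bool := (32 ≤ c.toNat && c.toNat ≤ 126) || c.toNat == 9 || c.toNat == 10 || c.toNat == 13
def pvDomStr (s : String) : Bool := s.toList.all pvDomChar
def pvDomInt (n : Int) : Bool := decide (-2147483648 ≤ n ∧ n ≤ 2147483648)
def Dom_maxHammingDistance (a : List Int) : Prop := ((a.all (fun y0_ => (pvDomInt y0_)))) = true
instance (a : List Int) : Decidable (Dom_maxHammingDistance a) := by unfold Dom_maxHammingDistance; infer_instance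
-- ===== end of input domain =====

-- B replaces A's per-shift rescan by one value→positions index whose same-value position
-- pairs are bucketed into a per-shift match histogram (measured much faster on inputs with
-- mostly-distinct values; same quadratic worst case when one value dominates).

-- ===== PORT A =====
-- for i in range(1, n-1): recompute the Hamming distance of a against its rotation by i.
def maxHammingDistance (a : List Int) : Int × List Int :=
  let n := a.length
  let s := a ++ a
  let st := (List.range' 1 (n - 2)).foldl
    (fun (st : Int × Nat) i =>
      let chd := (List.range n).foldl
        (fun c j => if s.getD j 0 ≠ s.getD (i + j) 0 then c + 1 else c) (0 : Int)
      if chd > st.1 then (chd, i) else st)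
    ((0 : Int), 0)
  (st.1, PySem.List.slice s (some (st.2 : Int)) (some ((st.2 : Int) + (n : Int))))

-- ===== PORT B =====
-- group positions by value; bucket every same-value position pair (p,q) at shift (q-p)%n;
-- then one scan over shifts reading chd = n - matches[i].
def maxHammingDistance_alt (a : List Int) : Int × List Int :=
  let n := a.length
  let pos := a.zipIdx.foldl
    (fun (d : PySem.Dict Int (List Int)) vj => d.modify vj.1 [] (fun l => l ++ [(vj.2 : Int)]))
    PySem.Dict.empty
  let matches' := pos.values.foldl
    (fun (m : List Int) idxs =>
      idxs.foldl (fun m p =>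
        idxs.foldl (fun m q =>
          -- matches[(q - p) % n] += 1 ; the index (q-p) % n is nonnegative and < n, so .toNat is exact
          let k := (PySem.Int.mod (q - p) (n : Int)).toNat
          m.set k (m.getD k 0 + 1)) m) m)
    (List.replicate n (0 : Int))
  let st := (List.range' 1 (n - 2)).foldl
    (fun (st : Int × Nat) i =>
      let chd := (n : Int) - matches'.getD i 0
      if chd > st.1 then (chd, i) else st)
    ((0 : Int), 0)
  let s := a ++ a
  (st.1, PySem.List.slice s (some (st.2 : Int)) (some ((st.2 : Int) + (n : Int))))

-- ===== PRECONDITION & SPEC =====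
def Spec_maxHammingDistance (a : List Int) (out : Int × List Int) : Prop := out = maxHammingDistance_alt a
instance (a : List Int) (out : Int × List Int) : Decidable (Spec_maxHammingDistance a out) := by unfold Spec_maxHammingDistance; infer_instance

-- ===== CLAIM (what is proved, stated in full; the proofs are below) =====
def Claim_equal_maxHammingDistance : Prop := ∀ (a : List Int), Dom_maxHammingDistance a → Spec_maxHammingDistance a (maxHammingDistance a)

-- ===== LEMMAS AND PROOFS =====

-- B's dict of positions and histogram, named for the proofs (definitionally the ones in the port).
def pvPosDict (a : List Int) : PySem.Dict Int (List Int) :=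
  a.zipIdx.foldl
    (fun (d : PySem.Dict Int (List Int)) vj => d.modify vj.1 [] (fun l => l ++ [(vj.2 : Int)]))
    PySem.Dict.empty

def pvMatches (a : List Int) : List Int :=
  (pvPosDict a).values.foldl
    (fun (m : List Int) idxs =>
      idxs.foldl (fun m p =>
        idxs.foldl (fun m q =>
          let k := (PySem.Int.mod (q - p) (a.length : Int)).toNat
          m.set k (m.getD k 0 + 1)) m) m)
    (List.replicate a.length (0 : Int))

-- the positions of value v in a, as Python ints
def pvPosOf (a : List Int) (v : Int) : List Int :=
  ((List.range a.length).filter (fun j => a.getD j 0 == v)).map (fun (j : Nat) => (j : Int))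

-- the number of positions j with a[j] = a[(j+i) % n]
def pvMatchCount (a : List Int) (i : Nat) : Nat :=
  (List.range a.length).countP (fun j => a.getD j 0 == a.getD ((j + i) % a.length) 0)

theorem pv_zipIdx_map_fst (a : List Int) : a.zipIdx.map Prod.fst = a := by
  rw [List.zipIdx_eq_zip_range']
  exact List.map_fst_zip (by simp)

theorem pv_zip_filter (a : List Int) (v : Int) :
    (a.zipIdx.filter (fun vj => vj.1 == v)).map (fun vj : Int × Nat => (vj.2 : Int)) = pvPosOf a v := by
  induction a using List.reverseRecOn with
  | nil => simp [pvPosOf]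
  | append_singleton xs x ih =>
    rw [List.zipIdx_append]
    simp only [List.filter_append, List.map_append, ih]
    unfold pvPosOf
    rw [List.length_append, List.length_singleton, List.range_succ, List.filter_append, List.map_append]
    congr 1
    · congr 1
      apply List.filter_congr
      intro j hj
      rw [List.getD_append _ _ _ _ (List.mem_range.mp hj)]
    · simp only [List.zipIdx_cons, List.zipIdx_nil, List.filter_singleton]
      by_cases h : x = v
      · simp [h]
      · have hb : (x == v) = false := by simp [h]
        simp [hb]

theorem pv_posDict_getD (a : List Int) (v : Int) :
    (pvPosDict a).getD v [] = pvPosOf a v := by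
  unfold pvPosDict
  rw [← List.foldl_map (f := fun vj : Int × Nat => (vj.1, (vj.2 : Int)))
      (g := fun (d : PySem.Dict Int (List Int)) p => d.modify p.1 [] (fun l => l ++ [p.2]))]
  rw [PySem.Dict.getD_foldl_modify_append]
  rw [List.filter_map, List.map_map]
  simpa using pv_zip_filter a v

theorem pv_posDict_keys (a : List Int) :
    (pvPosDict a).keys = PySem.Set.ofList a := by
  unfold pvPosDict
  rw [PySem.Dict.keys_foldl_modify_key a.zipIdx Prod.fst [] (fun _ vj => (fun l => l ++ [(vj.2 : Int)]))]
  rw [PySem.Dict.keys_empty, PySem.Set.update_nil_left, pv_zipIdx_map_fst]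

theorem pv_posDict_values (a : List Int) :
    (pvPosDict a).values = (PySem.Set.ofList a).map (fun v => pvPosOf a v) := by
  have hnd : (pvPosDict a).keys.Nodup := by
    rw [pv_posDict_keys]; exact PySem.Set.nodup_ofList a
  have h := PySem.Dict.items_eq_map_keys (pvPosDict a) hnd []
  show ((pvPosDict a).items).map Prod.snd = _
  rw [h, List.map_map, pv_posDict_keys]
  apply List.map_congr_left
  intro v _
  simp [pv_posDict_getD]

theorem pv_posOf_nodup (a : List Int) (v : Int) : (pvPosOf a v).Nodup := by
  have h : Function.Injective (fun j : Nat => (j : Int)) := fun x y h => by simpa using h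
  exact List.Nodup.map h (List.Nodup.filter _ List.nodup_range)

theorem pv_mem_posOf (a : List Int) (v q : Int) :
    q ∈ pvPosOf a v ↔ ∃ j : Nat, j < a.length ∧ a.getD j 0 = v ∧ q = (j : Int) := by
  unfold pvPosOf
  constructor
  · intro h
    rcases List.mem_map.mp h with ⟨j, hj, rfl⟩
    rcases List.mem_filter.mp hj with ⟨hjr, hjv⟩
    exact ⟨j, List.mem_range.mp hjr, by simpa using hjv, rfl⟩
  · rintro ⟨j, hj, hv, rfl⟩
    exact List.mem_map.mpr ⟨j, List.mem_filter.mpr ⟨List.mem_range.mpr hj, by simpa using hv⟩, rfl⟩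

-- counting a fold of position bumps
theorem pv_bump_getD (K : List Nat) : ∀ (m : List Int), (∀ k ∈ K, k < m.length) →
    ∀ i : Nat, i < m.length →
    (K.foldl (fun m k => m.set k (m.getD k 0 + 1)) m).getD i 0
      = m.getD i 0 + (K.count i : Int) := by
  induction K with
  | nil => intro m _ i _; simp
  | cons k K ih =>
    intro m hK i hi
    have hk : k < m.length := hK k (List.mem_cons_self ..)
    rw [List.foldl_cons, ih _ (by intro x hx; rw [List.length_set]; exact hK x (List.mem_cons_of_mem _ hx)) i (by rw [List.length_set]; exact hi)]
    rw [List.count_cons]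
    by_cases hki : k = i
    · subst hki
      simp only [List.getD_eq_getElem?_getD, List.getElem?_set, if_pos hk]
      simp [hk]
      ring
    · simp only [List.getD_eq_getElem?_getD, List.getElem?_set, if_neg hki]
      have : (k == i) = false := by simp [hki]
      simp [this]

-- solving (q-p) % n = i for q in [0,n)
theorem pv_mod_shift (n x p i : Int) (_hn : 0 < n) (h0 : 0 ≤ x) (hx : x < n)
    (hi0 : 0 ≤ i) (hilt : i < n) : (x - p) % n = i ↔ x = (p + i) % n := by
  constructor
  · intro h
    have hME : Int.ModEq n (x - p) i := by
      show (x - p) % n = i % n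
      rw [h, Int.emod_eq_of_lt hi0 hilt]
    have hME2 : Int.ModEq n x (p + i) := by
      have := hME.add_right p
      simpa [sub_add_cancel, add_comm] using this
    rw [← Int.emod_eq_of_lt h0 hx]
    exact hME2
  · intro h
    have hw : Int.ModEq n (p + i) x := by
      show (p + i) % n = x % n
      rw [h, Int.emod_emod_of_dvd _ (dvd_refl n)]
    have h2 : (x - p) % n = (p + i - p) % n := hw.symm.sub_right p
    rw [h2]
    have h3 : p + i - p = i := by ring
    rw [h3, Int.emod_eq_of_lt hi0 hilt]

-- each group contributes, per p, one potential match at q = (p+i) % n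
theorem pv_countP_key (a : List Int) (v p : Int) (i : Nat) (hi : i < a.length) :
    (pvPosOf a v).countP (fun q => (PySem.Int.mod (q - p) (a.length : Int)).toNat == i)
      = if a.getD (PySem.Int.mod (p + (i : Int)) (a.length : Int)).toNat 0 == v then 1 else 0 := by
  have hn : (0 : Int) < (a.length : Int) := by omega
  simp only [PySem.Int.mod_eq_emod_of_pos hn]
  obtain ⟨w, hwdef⟩ : ∃ w, (p + (i : Int)) % (a.length : Int) = w := ⟨_, rfl⟩
  rw [hwdef]
  have hw0 : 0 ≤ w := hwdef ▸ Int.emod_nonneg _ (by omega)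
  have hwlt : w < (a.length : Int) := hwdef ▸ Int.emod_lt_of_pos _ hn
  have h1 : (pvPosOf a v).countP (fun q => ((q - p) % (a.length : Int)).toNat == i)
      = (pvPosOf a v).countP (fun q => q == w) := by
    apply List.countP_congr
    intro q hq
    rcases (pv_mem_posOf a v q).mp hq with ⟨j, hj, hv, rfl⟩
    simp only [beq_iff_eq]
    have hsh := pv_mod_shift (a.length : Int) (j : Int) p (i : Int) hn (by omega)
      (by exact_mod_cast hj) (by omega) (by exact_mod_cast hi)
    rw [hwdef] at hsh
    have hq0 : 0 ≤ ((j : Int) - p) % (a.length : Int) := Int.emod_nonneg _ (by omega)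
    constructor
    · intro h
      exact hsh.mp ((Int.toNat_of_nonneg hq0).symm.trans (by rw [h]))
    · intro h
      rw [hsh.mpr h]
      simp
  rw [h1, ← List.count_eq_countP]
  by_cases hmem : w ∈ pvPosOf a v
  · rw [List.count_eq_one_of_mem (pv_posOf_nodup a v) hmem]
    rcases (pv_mem_posOf a v w).mp hmem with ⟨j, hj, hv, hwj⟩
    have hwn : w.toNat = j := by omega
    rw [if_pos (by simp only [hwn, beq_iff_eq]; exact hv)]
  · rw [List.count_eq_zero_of_not_mem hmem]
    rw [if_neg]
    intro hv
    apply hmem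
    apply (pv_mem_posOf a v w).mpr
    exact ⟨w.toNat, by omega, by simpa using hv, by omega⟩

-- a countP over the positions of v is a countP over all indices
theorem pv_countP_posOf (a : List Int) (v : Int) (p : Int → Bool) :
    (pvPosOf a v).countP p
      = (List.range a.length).countP (fun (j : Nat) => p (j : Int) && (a.getD j 0 == v)) := by
  unfold pvPosOf
  rw [List.countP_map, List.countP_filter]
  rfl

theorem pv_sum_ite {α : Type} (l : List α) (p : α → Bool) :
    (l.map (fun x => if p x then 1 else 0)).sum = l.countP p := by
  induction l with
  | nil => simp
  | cons x l ih =>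
    rw [List.map_cons, List.sum_cons, ih, List.countP_cons]
    by_cases h : p x <;> simp [h] <;> omega

-- fibre sum: summing a predicate's count over the distinct values of a covers each j once
theorem pv_sum_fiber (S : List Int) (hS : S.Nodup) (f : Nat → Int) (pred : Nat → Bool) :
    ∀ (l : List Nat), (∀ j ∈ l, f j ∈ S) →
    (S.map (fun v => l.countP (fun j => (f j == v) && pred j))).sum = l.countP pred := by
  intro l
  induction l with
  | nil => simp
  | cons j l ih =>
    intro hcov
    have hj : f j ∈ S := hcov j (List.mem_cons_self ..)
    simp only [List.countP_cons]
    rw [List.sum_map_add]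
    rw [ih (fun x hx => hcov x (List.mem_cons_of_mem _ hx))]
    congr 1
    by_cases hp : pred j
    · simp only [hp, Bool.and_true]
      rw [pv_sum_ite, if_pos trivial]
      have h1 : S.countP (fun v => f j == v) = S.countP (fun v => v == f j) := by
        apply List.countP_congr
        intro v _
        simp only [beq_iff_eq]
        exact eq_comm
      rw [h1, ← List.count_eq_countP, List.count_eq_one_of_mem hS hj]
    · simp only [hp, Bool.and_false]
      simp

-- the histogram counts matches: matches[i] = #{j < n | a[j] = a[(j+i)%n]}
theorem pv_matches_getD (a : List Int) (i : Nat) (hi : i < a.length) :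
    (pvMatches a).getD i 0 = (pvMatchCount a i : Int) := by
  have hn : (0 : Int) < (a.length : Int) := by omega
  have hflat : pvMatches a
      = ((pvPosDict a).values.flatMap (fun idxs => idxs.flatMap (fun p => idxs.map
          (fun q => (PySem.Int.mod (q - p) (a.length : Int)).toNat)))).foldl
          (fun m k => m.set k (m.getD k 0 + 1)) (List.replicate a.length (0 : Int)) := by
    unfold pvMatches
    simp only [List.foldl_flatMap, List.foldl_map]
  have hkey : ∀ k ∈ (pvPosDict a).values.flatMap (fun idxs => idxs.flatMap (fun p => idxs.map
      (fun q => (PySem.Int.mod (q - p) (a.length : Int)).toNat))),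
      k < (List.replicate a.length (0 : Int)).length := by
    intro k hk
    rw [List.length_replicate]
    rcases List.mem_flatMap.mp hk with ⟨idxs, _, hk2⟩
    rcases List.mem_flatMap.mp hk2 with ⟨p, _, hk3⟩
    rcases List.mem_map.mp hk3 with ⟨q, _, rfl⟩
    have h1 := PySem.Int.mod_nonneg (q - p) hn
    have h2 := PySem.Int.mod_lt (q - p) hn
    omega
  rw [hflat, pv_bump_getD _ _ hkey i (by simpa using hi)]
  have hcount : ((pvPosDict a).values.flatMap (fun idxs => idxs.flatMap (fun p => idxs.map
      (fun q => (PySem.Int.mod (q - p) (a.length : Int)).toNat)))).count i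
      = pvMatchCount a i := by
    rw [List.count_flatMap, pv_posDict_values, List.map_map]
    have hper : ∀ v ∈ PySem.Set.ofList a,
        ((List.count i ∘ (fun idxs => idxs.flatMap (fun p => idxs.map
            (fun q => (PySem.Int.mod (q - p) (a.length : Int)).toNat)))) ∘ (fun v => pvPosOf a v)) v
        = (List.range a.length).countP (fun (j : Nat) => (a.getD j 0 == v)
            && (a.getD (PySem.Int.mod ((j : Int) + (i : Int)) (a.length : Int)).toNat 0 == a.getD j 0)) := by
      intro v _
      show (((pvPosOf a v).flatMap (fun p => (pvPosOf a v).map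
          (fun q => (PySem.Int.mod (q - p) (a.length : Int)).toNat)))).count i = _
      rw [List.count_flatMap]
      have hp : ∀ p ∈ pvPosOf a v,
          (List.count i ∘ fun p => (pvPosOf a v).map
            (fun q => (PySem.Int.mod (q - p) (a.length : Int)).toNat)) p
          = if a.getD (PySem.Int.mod (p + (i : Int)) (a.length : Int)).toNat 0 == v then 1 else 0 := by
        intro p _
        show ((pvPosOf a v).map (fun q => (PySem.Int.mod (q - p) (a.length : Int)).toNat)).count i = _
        rw [List.count_eq_countP, List.countP_map]
        rw [show ((fun x => x == i) ∘ fun q => (PySem.Int.mod (q - p) (a.length : Int)).toNat)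
            = (fun q => (PySem.Int.mod (q - p) (a.length : Int)).toNat == i) from rfl]
        exact pv_countP_key a v p i hi
      rw [List.map_congr_left hp, pv_sum_ite, pv_countP_posOf]
      apply List.countP_congr
      intro j _
      by_cases hv : a.getD j 0 = v
      · subst hv
        cases hx : (a.getD (PySem.Int.mod ((j : Int) + (i : Int)) (a.length : Int)).toNat 0
            == a.getD j 0) <;> simp [hx]
      · have h2 : (a.getD j 0 == v) = false := by
          simp only [beq_eq_false_iff_ne, ne_eq]
          exact hv
        rw [h2]
        simp only [Bool.and_false, Bool.false_and]
    rw [List.map_congr_left hper]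
    rw [pv_sum_fiber (PySem.Set.ofList a) (PySem.Set.nodup_ofList a) (fun j => a.getD j 0) _
      (List.range a.length) (by
        intro j hj
        have hjl : j < a.length := List.mem_range.mp hj
        apply (PySem.Set.mem_ofList a (a.getD j 0)).mpr
        rw [List.getD_eq_getElem a 0 hjl]
        exact List.getElem_mem hjl)]
    unfold pvMatchCount
    apply List.countP_congr
    intro j hj
    have hjl : j < a.length := List.mem_range.mp hj
    have hcast : PySem.Int.mod ((j : Int) + (i : Int)) (a.length : Int) = (((j + i) % a.length : Nat) : Int) := by
      rw [show ((j : Int) + (i : Int)) = ((j + i : Nat) : Int) by push_cast; ring]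
      exact PySem.Int.mod_natCast (j + i) a.length
    rw [hcast]
    simp only [Int.toNat_natCast, beq_iff_eq]
    exact ⟨fun h => h.symm, fun h => h.symm⟩
  rw [hcount]
  have hrep : (List.replicate a.length (0 : Int)).getD i 0 = 0 := by
    simp [List.getD_eq_getElem?_getD, hi]
  rw [hrep]
  omega


-- A's inner loop computes n - matches[i]
theorem pv_chd_eq (a : List Int) (i : Nat) (hi : i < a.length) :
    (List.range a.length).foldl
      (fun c j => if (a ++ a).getD j 0 ≠ (a ++ a).getD (i + j) 0 then c + 1 else c) (0 : Int)
      = (a.length : Int) - (pvMatchCount a i : Int) := by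
  rw [PySem.List.foldl_ite_add_one]
  have hc : (List.range a.length).countP
      (fun j => decide ¬((a ++ a).getD j 0 = (a ++ a).getD (i + j) 0))
      = (List.range a.length).countP
      (fun j => !(a.getD j 0 == a.getD ((j + i) % a.length) 0)) := by
    apply List.countP_congr
    intro j hj
    have hjn : j < a.length := List.mem_range.mp hj
    have h1 : (a ++ a).getD j 0 = a.getD j 0 := List.getD_append _ _ _ _ hjn
    have h2 : (a ++ a).getD (i + j) 0 = a.getD ((j + i) % a.length) 0 := by
      by_cases hc : i + j < a.length
      · rw [List.getD_append _ _ _ _ hc]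
        congr 1
        rw [Nat.mod_eq_of_lt (by omega)]
        omega
      · rw [List.getD_append_right _ _ _ _ (by omega)]
        congr 1
        rw [Nat.mod_eq_sub_mod (by omega), Nat.mod_eq_of_lt (by omega)]
        omega
    rw [h1, h2]
    simp [decide_not]
  rw [hc]
  have hlen := List.length_eq_countP_add_countP
    (fun j => a.getD j 0 == a.getD ((j + i) % a.length) 0) (l := List.range a.length)
  rw [List.length_range] at hlen
  have hcompl : (List.range a.length).countP
      (fun j => !(a.getD j 0 == a.getD ((j + i) % a.length) 0))
      = (List.range a.length).countP
      (fun j => decide ¬((a.getD j 0 == a.getD ((j + i) % a.length) 0) = true)) := by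
    apply List.countP_congr; intro j _
    cases hp : (a.getD j 0 == a.getD ((j + i) % a.length) 0) <;> simp [hp]
  unfold pvMatchCount
  omega


-- the two selection loops coincide
theorem pv_st_eq (a : List Int) :
    (List.range' 1 (a.length - 2)).foldl
      (fun (st : Int × Nat) i =>
        let chd := (List.range a.length).foldl
          (fun c j => if (a ++ a).getD j 0 ≠ (a ++ a).getD (i + j) 0 then c + 1 else c) (0 : Int)
        if chd > st.1 then (chd, i) else st)
      ((0 : Int), 0)
    = (List.range' 1 (a.length - 2)).foldl
      (fun (st : Int × Nat) i =>
        let chd := (a.length : Int) - (pvMatches a).getD i 0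
        if chd > st.1 then (chd, i) else st)
      ((0 : Int), 0) := by
  apply PySem.List.foldl_congr_mem
  intro acc i hi
  rcases List.mem_range'_1.mp hi with ⟨h1, h2⟩
  have h : i < a.length := by omega
  simp only [pv_chd_eq a i h, pv_matches_getD a i h]

-- ===== VERDICT (by name: the statement is the Claim_ definition above) =====
theorem maxHammingDistance_spec : Claim_equal_maxHammingDistance := by
  intro a _
  show maxHammingDistance a = maxHammingDistance_alt a
  unfold maxHammingDistance maxHammingDistance_alt
  simp only [pv_st_eq a, pvMatches, pvPosDict]
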